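-- pv_equiv track=rewrite | github.com/beatbee/COMPRO-Python | quiz/quiz03.py | type5
-- ===== SOURCE A (Python) =====
-- import math
--
-- def check(l):
--     n = int(math.sqrt(l))+1
--     mn = 10000
--     ch = []
--     ans = 0
--     for i in range(1,n):
--         for j in range(1,n+1):
--             if i*j <= l :
--                 ch.append(j-i)
--                 if min(ch) <mn:
--                     mn = min(ch)
--                     ans = i
--     return ans+1
--
-- def type5(s):
--     n = check(len(s))
--     x = list(s)
--     lst = [['*']*n for i in range(n)]
--     a = 0
--     for i in range(n):
--         for j in range(n):
--             if a > len(s):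
--                 lst[i][j] == '*'
--             elif a<len(s):
--                 lst[i][j] = s[a]
--             a+=1
--     return lst
-- ===== SOURCE B (Python) =====
-- import math
--
-- def type5(s):
--     n = math.isqrt(len(s)) + 1
--     cells = list(s) + ['*'] * (n * n - len(s))
--     return [cells[r * n:(r + 1) * n] for r in range(n)]
-- ===== Notes on version B (the rewrite author's own statement) =====
-- stated objective: faster
-- what changed: A's quadratic helper check() (nested loops recomputing the min of a growing list) is replaced by the closed form isqrt(len(s))+1, and the index-by-index mutation of a pre-built star-filled grid is replaced by padding the character list and slicing it into rows.
import Mathlib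
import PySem

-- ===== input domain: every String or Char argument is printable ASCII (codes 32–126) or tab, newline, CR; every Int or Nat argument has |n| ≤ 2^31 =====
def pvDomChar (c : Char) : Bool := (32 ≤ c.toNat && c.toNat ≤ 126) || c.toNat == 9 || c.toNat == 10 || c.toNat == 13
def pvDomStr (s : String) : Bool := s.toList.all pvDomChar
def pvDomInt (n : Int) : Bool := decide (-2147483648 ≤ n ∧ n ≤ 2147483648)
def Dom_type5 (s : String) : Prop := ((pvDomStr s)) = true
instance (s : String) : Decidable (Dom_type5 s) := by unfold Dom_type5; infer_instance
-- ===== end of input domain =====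

-- B replaces A's quadratic search-loop `check` by the closed form isqrt(len)+1 and builds the
-- grid by slicing a padded character list instead of index-by-index mutation (objective: faster).

-- ===== PORT A =====
-- helper `check(l)`: nested loops over i,j tracking the running minimum of the list `ch`.
-- `int(math.sqrt(l))` is ported as Nat.sqrt l (exact: equal to int(math.sqrt(l)) for every
-- length in the stated domain, far below the 2^52 float-precision boundary).
def pvCheck (l : Nat) : Nat :=
  let n := Nat.sqrt l + 1
  let st := (List.range' 1 (n - 1)).foldl (fun st i =>
      (List.range' 1 n).foldl (fun st j =>
        if i * j ≤ l then
          let ch := st.1 ++ [(j : Int) - (i : Int)]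
          let m := (PySem.List.min? ch (fun y => y)).getD 0
          if m < st.2.1 then (ch, m, i) else (ch, st.2.1, st.2.2)
        else st) st)
    (([] : List Int), (10000 : Int), (0 : Nat))
  st.2.2 + 1

-- the Python branch `if a > len(s): lst[i][j] == '*'` is a comparison EXPRESSION with no
-- effect, ported as the no-op it is (only `a += 1` happens on that path too).
def type5 (s : String) : List (List String) :=
  let len := s.toList.length
  let n := pvCheck len
  let _x := s.toList.map (fun c => String.ofList [c])   -- `x = list(s)` (never read afterwards)
  let lst0 := List.replicate n (List.replicate n "*")
  let st := (List.range n).foldl (fun st i =>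
      (List.range n).foldl (fun st j =>
        if st.2 > len then (st.1, st.2 + 1)
        else if st.2 < len then
          (st.1.set i ((st.1.getD i []).set j
             (String.ofList [(PySem.Str.pyGet? s (st.2 : Int)).getD ' '])), st.2 + 1)
        else (st.1, st.2 + 1)) st)
    (lst0, 0)
  st.1

-- ===== PORT B =====
def type5_alt (s : String) : List (List String) :=
  let n := Nat.sqrt s.toList.length + 1    -- math.isqrt
  let cells := s.toList.map (fun c => String.ofList [c])
               ++ List.replicate (n * n - s.toList.length) "*"
  (List.range n).map (fun r =>
    PySem.List.slice cells (some ((r * n : Nat) : Int)) (some (((r + 1) * n : Nat) : Int)))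

-- ===== PRECONDITION & SPEC =====
def Spec_type5 (s : String) (out : List (List String)) : Prop := out = type5_alt s
instance (s : String) (out : List (List String)) : Decidable (Spec_type5 s out) := by unfold Spec_type5; infer_instance

-- ===== CLAIM (what is proved, stated in full; the proofs are below) =====
def Claim_equal_type5 : Prop := ∀ (s : String), Dom_type5 s → Spec_type5 s (type5 s)

-- ===== LEMMAS AND PROOFS =====

-- the padded cell list and the common grid both fill strategies produce
def pvCells (s : String) (n : Nat) : List String :=
  s.toList.map (fun c => String.ofList [c]) ++ List.replicate (n * n - s.toList.length) "*"

def pvRow (s : String) (n i : Nat) : List String :=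
  (List.range n).map (fun j => (pvCells s n).getD (i * n + j) "*")

def pvGrid (s : String) (n : Nat) : List (List String) :=
  (List.range n).map (fun i => pvRow s n i)

-- inner-loop body of pvCheck (i fixed) and of type5's fill loop (i fixed)
def pvCkB (l i : Nat) (st : List Int × Int × Nat) (j : Nat) : List Int × Int × Nat :=
  if i * j ≤ l then
    let ch := st.1 ++ [(j : Int) - (i : Int)]
    let m := (PySem.List.min? ch (fun y => y)).getD 0
    if m < st.2.1 then (ch, m, i) else (ch, st.2.1, st.2.2)
  else st

def pvFillB (s : String) (i : Nat) (st : List (List String) × Nat) (j : Nat) :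
    List (List String) × Nat :=
  if st.2 > s.toList.length then (st.1, st.2 + 1)
  else if st.2 < s.toList.length then
    (st.1.set i ((st.1.getD i []).set j
       (String.ofList [(PySem.Str.pyGet? s (st.2 : Int)).getD ' '])), st.2 + 1)
  else (st.1, st.2 + 1)

def pvRowUpd (s : String) (r : List String) (a0 m : Nat) : List String :=
  (List.range m).foldl (fun r j =>
    if a0 + j < s.toList.length
    then r.set j (String.ofList [(PySem.Str.pyGet? s ((a0 + j : Nat) : Int)).getD ' '])
    else r) r

lemma pvCells_length (s : String) (n : Nat) (h : s.toList.length ≤ n * n) :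
    (pvCells s n).length = n * n := by
  unfold pvCells
  rw [List.length_append, List.length_map, List.length_replicate]; omega

lemma pvCells_getD_lt (s : String) (n a : Nat) (h : a < s.toList.length) :
    (pvCells s n).getD a "*" = String.ofList [(PySem.Str.pyGet? s (a : Int)).getD ' '] := by
  unfold pvCells
  rw [List.getD_eq_getElem?_getD, List.getElem?_append_left (by simpa using h)]
  simp [List.getElem?_map, List.getElem?_eq_getElem (by simpa using h)]

lemma pvCells_getD_ge (s : String) (n a : Nat) (h : s.toList.length ≤ a) :
    (pvCells s n).getD a "*" = "*" := by
  unfold pvCells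
  rw [List.getD_eq_getElem?_getD]
  have hs : s.toList.length = s.length := by simp
  rcases Nat.lt_or_ge a (s.toList.length + (n * n - s.toList.length)) with hlt | hge
  · rw [List.getElem?_append_right (by simpa using h)]
    simp only [List.getElem?_replicate]
    split_ifs <;> rfl
  · rw [List.getElem?_eq_none (by simp only [List.length_append, List.length_map, List.length_replicate, hs] at hge ⊢; omega)]
    rfl

-- min(ch) when v ∈ ch is a lower bound of ch
lemma pvMin_val (ch : List Int) (v : Int) (hv : v ∈ ch) (hb : ∀ y ∈ ch, v ≤ y) :
    (PySem.List.min? ch (fun y => y)).getD 0 = v := by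
  obtain ⟨m, hm⟩ : ∃ m, PySem.List.min? ch (fun y => y) = some m := by
    rcases h : PySem.List.min? ch (fun y => y) with _ | m
    · rw [PySem.List.min?_eq_none_iff] at h; subst h; simp at hv
    · exact ⟨m, rfl⟩
  have h1 : m ≤ v := PySem.List.min?_isMin hm v hv
  have h2 : v ≤ m := hb m (PySem.List.min?_mem hm)
  rw [hm]; simp; omega

lemma pvCk_tail (l i : Nat) (J : List Nat) (hJ : ∀ j ∈ J, 2 ≤ j) :
    ∀ ch : List Int, (1 - (i : Int)) ∈ ch → (∀ y ∈ ch, 1 - (i : Int) ≤ y) →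
      ∃ ch', J.foldl (pvCkB l i) (ch, 1 - (i : Int), i) = (ch', 1 - (i : Int), i) ∧
        (1 - (i : Int)) ∈ ch' ∧ (∀ y ∈ ch', 1 - (i : Int) ≤ y) := by
  induction J with
  | nil => intro ch h1 h2; exact ⟨ch, rfl, h1, h2⟩
  | cons j J ih =>
    intro ch h1 h2
    have hj : 2 ≤ j := hJ j (by simp)
    have hJ' : ∀ j' ∈ J, 2 ≤ j' := fun j' h => hJ j' (by simp [h])
    simp only [List.foldl_cons]
    by_cases hle : i * j ≤ l
    · have hb : ∀ y ∈ ch ++ [(j : Int) - (i : Int)], 1 - (i : Int) ≤ y := by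
        intro y hy
        rcases List.mem_append.mp hy with h | h
        · exact h2 y h
        · simp at h; omega
      have h1' : (1 - (i : Int)) ∈ ch ++ [(j : Int) - (i : Int)] := by simp [h1]
      have hmv := pvMin_val _ _ h1' hb
      have : pvCkB l i (ch, 1 - (i : Int), i) j = (ch ++ [(j : Int) - (i : Int)], 1 - (i : Int), i) := by
        simp only [pvCkB, if_pos hle, hmv]
        simp
      rw [this]
      exact ih hJ' _ h1' hb
    · rw [show pvCkB l i (ch, 1 - (i : Int), i) j = (ch, 1 - (i : Int), i) by simp [pvCkB, hle]]
      exact ih hJ' ch h1 h2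

lemma pvCk_inner (l i : Nat) (_hi : 1 ≤ i) (hil : i ≤ l) (n : Nat) (hn : 1 ≤ n)
    (ch : List Int) (mn : Int) (ans : Nat)
    (hch : ∀ y ∈ ch, 1 - (i : Int) < y) (hmn : 1 - (i : Int) < mn) :
    ∃ ch', (List.range' 1 n).foldl (pvCkB l i) (ch, mn, ans) = (ch', 1 - (i : Int), i) ∧
      (∀ y ∈ ch', 1 - (i : Int) ≤ y) := by
  obtain ⟨n', rfl⟩ : ∃ n', n = n' + 1 := ⟨n - 1, by omega⟩
  rw [show List.range' 1 (n' + 1) = 1 :: List.range' 2 n' from rfl]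
  simp only [List.foldl_cons]
  have hb : ∀ y ∈ ch ++ [(1 : Int) - (i : Int)], 1 - (i : Int) ≤ y := by
    intro y hy
    rcases List.mem_append.mp hy with h | h
    · exact le_of_lt (hch y h)
    · simp at h; omega
  have h1' : (1 - (i : Int)) ∈ ch ++ [(1 : Int) - (i : Int)] := by simp
  have hmv := pvMin_val _ _ h1' hb
  have hstep : pvCkB l i (ch, mn, ans) 1 = (ch ++ [(1 : Int) - (i : Int)], 1 - (i : Int), i) := by
    simp only [pvCkB, Nat.mul_one, if_pos hil]
    simp only [Nat.cast_one] at hmv ⊢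
    rw [hmv, if_pos hmn]
  rw [hstep]
  obtain ⟨ch', he, hm, hb'⟩ := pvCk_tail l i (List.range' 2 n')
    (fun j hj => (List.mem_range'_1.mp hj).1) _ h1' hb
  exact ⟨ch', he, hb'⟩

lemma pvCk_outer (l : Nat) : ∀ k, k ≤ Nat.sqrt l →
    ∃ ch mn ans, (List.range' 1 k).foldl
        (fun st i => (List.range' 1 (Nat.sqrt l + 1)).foldl (pvCkB l i) st)
        (([] : List Int), (10000 : Int), (0 : Nat)) = (ch, mn, ans) ∧
      (∀ y ∈ ch, -(k : Int) < y) ∧ (-(k : Int) < mn) ∧ ans = k := by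
  intro k
  induction k with
  | zero => intro _; exact ⟨[], 10000, 0, rfl, by simp, by norm_num, rfl⟩
  | succ k ih =>
    intro hk
    obtain ⟨ch, mn, ans, he, hch, hmn, hans⟩ := ih (by omega)
    rw [show List.range' 1 (k + 1) = List.range' 1 k ++ [1 + k] by
          have := List.range'_concat (s := 1) (n := k) (step := 1)
          simpa using this]
    rw [List.foldl_append, he]
    simp only [List.foldl_cons, List.foldl_nil]
    have hik : (1 + k : Nat) ≤ l := by
      have h1 : Nat.sqrt l ≤ l := Nat.sqrt_le_self l
      omega
    obtain ⟨ch', he', hb'⟩ := pvCk_inner l (1 + k) (by omega) hik (Nat.sqrt l + 1) (by omega)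
      ch mn ans (by intro y hy; have := hch y hy; push_cast; omega)
      (by push_cast; omega)
    refine ⟨ch', 1 - ((1 + k : Nat) : Int), 1 + k, he', ?_, by push_cast; omega, by omega⟩
    intro y hy
    have := hb' y hy
    push_cast at this ⊢
    omega

lemma pvCheck_eq (l : Nat) : pvCheck l = Nat.sqrt l + 1 := by
  obtain ⟨ch, mn, ans, he, _, _, hans⟩ := pvCk_outer l (Nat.sqrt l) (le_refl _)
  unfold pvCheck
  simp only [Nat.add_sub_cancel]
  have hb : (fun (st : List Int × Int × Nat) i =>
      (List.range' 1 (Nat.sqrt l + 1)).foldl (pvCkB l i) st) =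
      (fun st i => (List.range' 1 (Nat.sqrt l + 1)).foldl (fun st j =>
        if i * j ≤ l then
          let ch := st.1 ++ [(j : Int) - (i : Int)]
          let m := (PySem.List.min? ch (fun y => y)).getD 0
          if m < st.2.1 then (ch, m, i) else (ch, st.2.1, st.2.2)
        else st) st) := by
    rfl
  rw [← hb, he, hans]

lemma pvFill_inner (s : String) (i : Nat) : ∀ (m : Nat) (lst : List (List String)) (a0 : Nat),
    i < lst.length →
    (List.range m).foldl (pvFillB s i) (lst, a0) =
      (lst.set i (pvRowUpd s (lst.getD i []) a0 m), a0 + m) := by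
  intro m
  induction m with
  | zero =>
    intro lst a0 hi
    unfold pvRowUpd
    simp only [List.range_zero, List.foldl_nil, Nat.add_zero, Prod.mk.injEq, and_true]
    rw [List.getD_eq_getElem _ _ hi, List.set_getElem_self]
  | succ m ih =>
    intro lst a0 hi
    rw [List.range_succ, List.foldl_append, ih lst a0 hi]
    simp only [List.foldl_cons, List.foldl_nil]
    have hlen : i < (lst.set i (pvRowUpd s (lst.getD i []) a0 m)).length := by
      simpa using hi
    have hget : (lst.set i (pvRowUpd s (lst.getD i []) a0 m)).getD i [] =
        pvRowUpd s (lst.getD i []) a0 m := by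
      rw [List.getD_eq_getElem _ _ hlen, List.getElem_set_self]
    have hupd : pvRowUpd s (lst.getD i []) a0 (m + 1) =
        (if a0 + m < s.toList.length
         then (pvRowUpd s (lst.getD i []) a0 m).set m
            (String.ofList [(PySem.Str.pyGet? s ((a0 + m : Nat) : Int)).getD ' '])
         else pvRowUpd s (lst.getD i []) a0 m) := by
      unfold pvRowUpd
      rw [List.range_succ, List.foldl_append]
      simp
    unfold pvFillB
    simp only [hget]
    by_cases h1 : a0 + m > s.toList.length
    · rw [if_pos h1, hupd, if_neg (by omega)]; rfl
    · rw [if_neg h1]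
      by_cases h2 : a0 + m < s.toList.length
      · rw [if_pos h2, hupd, if_pos h2, List.set_set]; rfl
      · rw [if_neg h2, hupd, if_neg h2]; rfl

lemma pvRowUpd_replicate (s : String) (n a0 : Nat) : ∀ m, m ≤ n →
    pvRowUpd s (List.replicate n "*") a0 m =
      (List.range n).map (fun j => if j < m then (pvCells s n).getD (a0 + j) "*" else "*") := by
  intro m
  induction m with
  | zero =>
    intro _
    unfold pvRowUpd
    simp only [List.range_zero, List.foldl_nil, Nat.not_lt_zero, if_false]
    rw [List.map_const', List.length_range]
  | succ m ih =>
    intro hm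
    have hstep : pvRowUpd s (List.replicate n "*") a0 (m + 1) =
        (if a0 + m < s.toList.length
         then (pvRowUpd s (List.replicate n "*") a0 m).set m
            (String.ofList [(PySem.Str.pyGet? s ((a0 + m : Nat) : Int)).getD ' '])
         else pvRowUpd s (List.replicate n "*") a0 m) := by
      unfold pvRowUpd
      rw [List.range_succ, List.foldl_append]
      simp
    rw [hstep, ih (by omega)]
    by_cases h : a0 + m < s.toList.length
    · rw [if_pos h]
      apply List.ext_getElem
      · simp
      · intro k hk1 hk2
        simp only [List.length_set, List.length_map, List.length_range] at hk1 hk2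
        rw [List.getElem_set]
        simp only [List.getElem_map, List.getElem_range]
        by_cases hkm : m = k
        · subst hkm
          rw [if_pos rfl, if_pos (by omega), pvCells_getD_lt s n _ h]
        · rw [if_neg hkm]
          by_cases hlt : k < m
          · rw [if_pos hlt, if_pos (by omega)]
          · rw [if_neg hlt, if_neg (by omega)]
    · rw [if_neg h]
      apply List.map_congr_left
      intro j hj
      by_cases hjm : j = m
      · subst hjm
        rw [if_neg (by omega), if_pos (by omega), pvCells_getD_ge s n _ (by omega)]
      · by_cases hlt : j < m
        · rw [if_pos hlt, if_pos (by omega)]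
        · rw [if_neg hlt, if_neg (by omega)]

lemma pvFill_outer (s : String) (n : Nat) : ∀ k, k ≤ n →
    (List.range k).foldl (fun st i => (List.range n).foldl (pvFillB s i) st)
        (List.replicate n (List.replicate n "*"), 0) =
      ((List.range n).map (fun i => if i < k then pvRow s n i else List.replicate n "*"), k * n) := by
  intro k
  induction k with
  | zero =>
    intro _
    simp [List.map_const']
  | succ k ih =>
    intro hk
    rw [List.range_succ, List.foldl_append, ih (by omega)]
    simp only [List.foldl_cons, List.foldl_nil]
    set G := (List.range n).map (fun i => if i < k then pvRow s n i else List.replicate n "*") with hG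
    have hlen : k < G.length := by simp [hG]; omega
    rw [pvFill_inner s k n G (k * n) hlen]
    have hget : G.getD k [] = List.replicate n "*" := by
      rw [List.getD_eq_getElem _ _ hlen]
      simp only [hG, List.getElem_map, List.getElem_range]
      rw [if_neg (by omega)]
    rw [hget, pvRowUpd_replicate s n (k * n) n (le_refl n)]
    simp only [Prod.mk.injEq]
    refine ⟨?_, by ring⟩
    have hrow : (List.range n).map (fun j => if j < n then (pvCells s n).getD (k * n + j) "*" else "*") = pvRow s n k := by
      unfold pvRow
      apply List.map_congr_left
      intro j hj
      rw [if_pos (List.mem_range.mp hj)]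
    rw [hrow]
    apply List.ext_getElem
    · simp [hG]
    · intro t ht1 ht2
      simp only [List.length_set, hG, List.length_map, List.length_range] at ht1 ht2
      rw [List.getElem_set]
      simp only [hG, List.getElem_map, List.getElem_range]
      by_cases hkt : k = t
      · subst hkt; rw [if_pos rfl, if_pos (by omega)]
      · rw [if_neg hkt]
        by_cases hlt : t < k
        · rw [if_pos hlt, if_pos (by omega)]
        · rw [if_neg hlt, if_neg (by omega)]

lemma grid_final (s : String) (n : Nat) :
    ((List.range n).map (fun i => if i < n then pvRow s n i else List.replicate n "*")) = pvGrid s n := by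
  unfold pvGrid
  apply List.map_congr_left
  intro i hi
  rw [if_pos (List.mem_range.mp hi)]

lemma pvSlice_row (s : String) (n r : Nat) (hlen : s.toList.length ≤ n * n) (hr : r < n) :
    PySem.List.slice (pvCells s n) (some ((r * n : Nat) : Int)) (some (((r + 1) * n : Nat) : Int)) =
      pvRow s n r := by
  rw [PySem.List.slice_natCast]
  have hcl : (pvCells s n).length = n * n := pvCells_length s n hlen
  have hsm : (r + 1) * n = r * n + n := by ring
  have hle : (r + 1) * n ≤ n * n := Nat.mul_le_mul_right n (by omega)
  have hsub : (r + 1) * n - r * n = n := by omega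
  rw [hsub]
  unfold pvRow
  apply List.ext_getElem
  · simp only [List.length_take, List.length_drop, hcl, List.length_map, List.length_range]
    omega
  · intro j hj1 hj2
    simp only [List.length_take, List.length_drop, hcl] at hj1
    simp only [List.length_map, List.length_range] at hj2
    rw [List.getElem_take, List.getElem_drop, List.getElem_map, List.getElem_range]
    have hidx : r * n + j < n * n := by omega
    rw [List.getD_eq_getElem _ _ (by rw [hcl]; exact hidx)]

lemma type5_eq_grid (s : String) : type5 s = pvGrid s (Nat.sqrt s.toList.length + 1) := by
  have h0 : type5 s = ((List.range (pvCheck s.toList.length)).foldl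
      (fun st i => (List.range (pvCheck s.toList.length)).foldl (pvFillB s i) st)
      (List.replicate (pvCheck s.toList.length) (List.replicate (pvCheck s.toList.length) "*"), 0)).1 := rfl
  rw [h0, pvCheck_eq]
  rw [pvFill_outer s _ _ (le_refl _)]
  exact grid_final s _

lemma type5_alt_eq_grid (s : String) : type5_alt s = pvGrid s (Nat.sqrt s.toList.length + 1) := by
  set n := Nat.sqrt s.toList.length + 1 with hn
  have hlen : s.toList.length ≤ n * n := le_of_lt (Nat.lt_succ_sqrt s.toList.length)
  unfold type5_alt pvGrid
  apply List.map_congr_left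
  intro r hr
  exact pvSlice_row s n r hlen (List.mem_range.mp hr)

-- ===== VERDICT (by name: the statement is the Claim_ definition above) =====
theorem type5_spec : Claim_equal_type5 := by
  intro s _
  unfold Spec_type5
  rw [type5_eq_grid, type5_alt_eq_grid]
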